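-- pv_equiv track=rewrite | github.com/Alex92rus/ErrorDetectionProject | classifier/classifier.py | feed_windows_only_tokens
-- ===== SOURCE A (Python) =====
-- has_error = 1
--
-- no_error = 0
--
-- def feed_windows_only_tokens(_data, _window_size):
--     windows = []
--     for sentence, errors in _data:
--         tokens = sentence.split()
--         word_window_size = min(len(tokens), _window_size)
--         for i in range(0, len(tokens) - word_window_size + 1):
--             window_tuple = (tokens[i:i + word_window_size], )
--             window_range = range(i, i + word_window_size)
--             for error in errors:
--                 if error[0] in window_range or error[1] in window_range:
--                     if len(window_tuple) < 2:
--                         window_tuple = window_tuple + (has_error, )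
--             if len(window_tuple) == 1:
--                 window_tuple = window_tuple + (no_error, )
--             windows.append(window_tuple)
--     return windows
-- ===== SOURCE B (Python) =====
-- has_error = 1
--
-- no_error = 0
--
-- def feed_windows_only_tokens(_data, _window_size):
--     # One pass per sentence: mark error-endpoint positions in a set, build a
--     # prefix-count array, then label each window by a prefix difference.
--     windows = []
--     for sentence, errors in _data:
--         tokens = sentence.split()
--         n = len(tokens)
--         w = min(n, _window_size)
--         pts = set()
--         for e in errors:
--             pts.add(e[0])
--             pts.add(e[1])
--         prefix = [0]
--         count = 0
--         for k in range(n):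
--             if k in pts:
--                 count += 1
--             prefix.append(count)
--         for i in range(n - w + 1):
--             if 0 < w and prefix[i] < prefix[i + w]:
--                 windows.append((tokens[i:i + w], has_error))
--             else:
--                 windows.append((tokens[i:i + w], no_error))
--     return windows
-- ===== Notes on version B (the rewrite author's own statement) =====
-- stated objective: alternative
-- what changed: A rescans the whole error list for every window; B marks error-endpoint positions in a set once per sentence, builds a prefix-count array, and labels each window by a single prefix difference.
-- outside the precondition, e.g. on feed_windows_only_tokens([('a b', [[0]])], 2): A returns [(['a', 'b'], 1)], B raises IndexError
import Mathlib
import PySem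

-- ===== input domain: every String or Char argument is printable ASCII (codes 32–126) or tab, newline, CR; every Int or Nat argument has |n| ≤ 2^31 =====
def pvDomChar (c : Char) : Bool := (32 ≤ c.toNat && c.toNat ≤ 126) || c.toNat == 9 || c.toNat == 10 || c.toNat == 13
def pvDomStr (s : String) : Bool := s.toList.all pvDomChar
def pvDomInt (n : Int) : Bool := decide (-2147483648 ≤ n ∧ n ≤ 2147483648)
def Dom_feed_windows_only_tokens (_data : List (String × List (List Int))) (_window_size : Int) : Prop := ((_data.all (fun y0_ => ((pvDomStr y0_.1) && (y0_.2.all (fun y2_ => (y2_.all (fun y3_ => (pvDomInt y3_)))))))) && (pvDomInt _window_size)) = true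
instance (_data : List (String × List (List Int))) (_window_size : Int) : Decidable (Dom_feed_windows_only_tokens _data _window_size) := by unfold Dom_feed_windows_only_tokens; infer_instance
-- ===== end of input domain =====

-- B replaces A's per-window scan of the whole error list by one prefix-count array per
-- sentence, labelling each window by a prefix difference (equal return values; proved below).

-- ===== PORT A =====
-- `x in range(a, b)` for a step-1 range: exact arithmetic membership test a ≤ x < b
def pvInRange (x a b : Int) : Bool := decide (a ≤ x) && decide (x < b)

-- error[0] / error[1] are ported as pyGetD (default 0): inside Pre_ every error has ≥ 2
-- elements, so the default is never consulted there.
def feed_windows_only_tokens (_data : List (String × List (List Int))) (_window_size : Int) : List (List String × Int) :=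
  _data.foldl (fun windows sen =>
    let tokens := PySem.Str.split₀ sen.1
    let wws : Int := min (tokens.length : Int) _window_size
    (PySem.List.pyRange 0 ((tokens.length : Int) - wws + 1)).foldl (fun windows i =>
      -- window_tuple = (tokens[i:i+w],) possibly extended once by (has_error,):
      -- the optional second component is an Option Int (none ↔ the tuple still has length 1)
      let tup2 : Option Int := sen.2.foldl (fun st e =>
        if (pvInRange (PySem.List.pyGetD e 0 0) i (i + wws)
             || pvInRange (PySem.List.pyGetD e 1 0) i (i + wws))
           && st.isNone
        then some 1 else st) none
      windows ++ [(PySem.List.slice tokens (some i) (some (i + wws)), tup2.getD 0)])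
      windows) []

-- ===== PORT B =====
def feed_windows_only_tokens_alt (_data : List (String × List (List Int))) (_window_size : Int) : List (List String × Int) :=
  _data.foldl (fun windows sen =>
    let tokens := PySem.Str.split₀ sen.1
    let n : Int := tokens.length
    let w : Int := min n _window_size
    let pts : PySem.Set Int := sen.2.foldl (fun pts e =>
      PySem.Set.add (PySem.Set.add pts (PySem.List.pyGetD e 0 0)) (PySem.List.pyGetD e 1 0))
      PySem.Set.empty
    let pc : List Int × Int := (PySem.List.pyRange 0 n).foldl (fun (pc : List Int × Int) k =>
      let count := if PySem.Set.contains pts k then pc.2 + 1 else pc.2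
      (pc.1 ++ [count], count)) ([0], 0)
    (PySem.List.pyRange 0 (n - w + 1)).foldl (fun windows i =>
      if 0 < w ∧ PySem.List.pyGetD pc.1 i 0 < PySem.List.pyGetD pc.1 (i + w) 0
      then windows ++ [(PySem.List.slice tokens (some i) (some (i + w)), 1)]
      else windows ++ [(PySem.List.slice tokens (some i) (some (i + w)), 0)])
      windows) []

-- ===== PRECONDITION & SPEC =====
-- Pre_ excludes error entries with fewer than two elements: on those Python A raises
-- IndexError on error[1] (except when the first endpoint happens to lie in every window,
-- where the short-circuit `or` masks the missing element), and B raises IndexError too.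
def Pre_feed_windows_only_tokens (_data : List (String × List (List Int))) (_window_size : Int) : Prop :=
  ∀ p ∈ _data, ∀ e ∈ p.2, 2 ≤ e.length
instance (_data : List (String × List (List Int))) (_window_size : Int) : Decidable (Pre_feed_windows_only_tokens _data _window_size) := by unfold Pre_feed_windows_only_tokens; infer_instance

def pvWitness_feed_windows_only_tokens : (List (String × List (List Int))) × Int := ([("a b", [[0, 1]])], 2)

def Spec_feed_windows_only_tokens (_data : List (String × List (List Int))) (_window_size : Int) (out : List (List String × Int)) : Prop := out = feed_windows_only_tokens_alt _data _window_size
instance (_data : List (String × List (List Int))) (_window_size : Int) (out : List (List String × Int)) : Decidable (Spec_feed_windows_only_tokens _data _window_size out) := by unfold Spec_feed_windows_only_tokens; infer_instance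

-- ===== CLAIM (what is proved, stated in full; the proofs are below) =====
def Claim_equal_feed_windows_only_tokens : Prop := ∀ (_data : List (String × List (List Int))) (_window_size : Int), Dom_feed_windows_only_tokens _data _window_size → Pre_feed_windows_only_tokens _data _window_size → Spec_feed_windows_only_tokens _data _window_size (feed_windows_only_tokens _data _window_size)

-- ===== LEMMAS AND PROOFS =====

-- A's error loop: once the label has been appended (state `some v`) it never changes
theorem pvLabelFold_some (c : List Int → Bool) (E : List (List Int)) (v : Int) :
    E.foldl (fun (st : Option Int) e => if c e && st.isNone then some 1 else st) (some v) = some v := by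
  induction E with
  | nil => rfl
  | cons e E ih =>
    have hc : (c e && (some v : Option Int).isNone) = false := by simp
    simp only [List.foldl_cons, hc, Bool.false_eq_true, if_false]
    exact ih

-- A's error loop computes `any`
theorem pvLabelFold_none (c : List Int → Bool) (E : List (List Int)) :
    E.foldl (fun (st : Option Int) e => if c e && st.isNone then some 1 else st) none
      = if E.any c then some 1 else none := by
  induction E with
  | nil => rfl
  | cons e E ih =>
    by_cases h : c e = true
    · rw [List.foldl_cons]
      have hs : (if (c e && (none : Option Int).isNone) = true then (some 1 : Option Int)
          else none) = some 1 := by simp [h]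
      rw [hs, pvLabelFold_some]
      simp [h]
    · have hc' : c e = false := by simpa using h
      rw [List.foldl_cons]
      have hs : (if (c e && (none : Option Int).isNone) = true then (some 1 : Option Int)
          else none) = none := by simp [hc']
      rw [hs, ih]
      simp [hc']

-- membership in B's endpoint set
theorem pvMem_ptsFold (E : List (List Int)) (s : PySem.Set Int) (x : Int) :
    x ∈ E.foldl (fun pts e =>
        PySem.Set.add (PySem.Set.add pts (PySem.List.pyGetD e 0 0)) (PySem.List.pyGetD e 1 0)) s
      ↔ x ∈ s ∨ ∃ e ∈ E, x = PySem.List.pyGetD e 0 0 ∨ x = PySem.List.pyGetD e 1 0 := by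
  induction E generalizing s with
  | nil => simp
  | cons e E ih =>
    simp only [List.foldl_cons, ih, PySem.Set.mem_add, List.mem_cons]
    constructor
    · rintro (((h | h) | h) | ⟨e', he', h⟩)
      · exact Or.inl h
      · exact Or.inr ⟨e, Or.inl rfl, Or.inl h⟩
      · exact Or.inr ⟨e, Or.inl rfl, Or.inr h⟩
      · exact Or.inr ⟨e', Or.inr he', h⟩
    · rintro (h | ⟨e', (rfl | he'), h⟩)
      · exact Or.inl (Or.inl (Or.inl h))
      · rcases h with h | h
        · exact Or.inl (Or.inl (Or.inr h))
        · exact Or.inl (Or.inr h)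
      · exact Or.inr ⟨e', he', h⟩

-- number of marked positions below m
def pvC (χ : Int → Bool) (m : Nat) : Int :=
  (((List.range m).countP (fun k : Nat => χ (k : Int)) : Nat) : Int)

theorem pvC_succ (χ : Int → Bool) (m : Nat) :
    pvC χ (m + 1) = if χ (m : Int) then pvC χ m + 1 else pvC χ m := by
  unfold pvC
  rw [List.range_succ, List.countP_append]
  by_cases h : χ (m : Int) = true <;> simp [List.countP, List.countP.go, h]

-- B's prefix loop builds exactly the table of pvC values
theorem pvPrefixFold (χ : Int → Bool) (n : Nat) :
    (PySem.List.pyRange 0 (n : Int)).foldl (fun (pc : List Int × Int) k =>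
        let count := if χ k then pc.2 + 1 else pc.2
        (pc.1 ++ [count], count)) ([0], 0)
      = ((List.range (n + 1)).map (pvC χ), pvC χ n) := by
  rw [PySem.List.pyRange_zero_natCast, List.foldl_map]
  induction n with
  | zero => simp [pvC]
  | succ n ih =>
    rw [List.range_succ, List.foldl_append, ih]
    simp only [List.foldl_cons, List.foldl_nil]
    rw [List.range_succ (n := n + 1), List.map_append, pvC_succ]
    by_cases h : χ (n : Int) = true <;> simp [h, pvC_succ]

-- prefix difference is positive iff some marked position lies in [a, b)
theorem pvC_lt_iff (χ : Int → Bool) (a b : Nat) (hab : a ≤ b) :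
    (pvC χ a < pvC χ b) ↔ ∃ k : Nat, a ≤ k ∧ k < b ∧ χ (k : Int) = true := by
  obtain ⟨d, rfl⟩ : ∃ d, b = a + d := ⟨b - a, by omega⟩
  unfold pvC
  rw [List.range_add, List.countP_append, List.countP_map]
  constructor
  · intro h
    have hpos : 0 < (List.range d).countP ((fun k : Nat => χ (k : Int)) ∘ fun x => a + x) := by
      push_cast at h; omega
    rw [List.countP_pos_iff] at hpos
    obtain ⟨x, hx, hχ⟩ := hpos
    refine ⟨a + x, by omega, by simp at hx; omega, hχ⟩
  · rintro ⟨k, h1, h2, h3⟩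
    have hpos : 0 < (List.range d).countP ((fun k : Nat => χ (k : Int)) ∘ fun x => a + x) := by
      rw [List.countP_pos_iff]
      refine ⟨k - a, by simp; omega, ?_⟩
      simpa [Function.comp, Nat.add_sub_cancel' h1] using h3
    push_cast; omega

-- per-sentence equality of A's window loop and B's prefix-difference loop
theorem pvSentenceEq (tokens : List String) (E : List (List Int)) (ws : Int)
    (acc : List (List String × Int)) :
    (PySem.List.pyRange 0 ((tokens.length : Int) - min (tokens.length : Int) ws + 1)).foldl
      (fun windows i =>
        windows ++
          [(PySem.List.slice tokens (some i) (some (i + min (tokens.length : Int) ws)),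
            (E.foldl (fun (st : Option Int) e =>
              if (pvInRange (PySem.List.pyGetD e 0 0) i (i + min (tokens.length : Int) ws)
                   || pvInRange (PySem.List.pyGetD e 1 0) i (i + min (tokens.length : Int) ws))
                 && st.isNone
              then some 1 else st) none).getD 0)]) acc
      =
    (PySem.List.pyRange 0 ((tokens.length : Int) - min (tokens.length : Int) ws + 1)).foldl
      (fun windows i =>
        if 0 < min (tokens.length : Int) ws ∧
            PySem.List.pyGetD
              ((PySem.List.pyRange 0 (tokens.length : Int)).foldl
                (fun (pc : List Int × Int) k =>
                  let count := if PySem.Set.contains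
                      (E.foldl (fun pts e =>
                        PySem.Set.add (PySem.Set.add pts (PySem.List.pyGetD e 0 0))
                          (PySem.List.pyGetD e 1 0)) PySem.Set.empty) k
                    then pc.2 + 1 else pc.2
                  (pc.1 ++ [count], count)) ([0], 0)).1 i 0
            < PySem.List.pyGetD
              ((PySem.List.pyRange 0 (tokens.length : Int)).foldl
                (fun (pc : List Int × Int) k =>
                  let count := if PySem.Set.contains
                      (E.foldl (fun pts e =>
                        PySem.Set.add (PySem.Set.add pts (PySem.List.pyGetD e 0 0))
                          (PySem.List.pyGetD e 1 0)) PySem.Set.empty) k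
                    then pc.2 + 1 else pc.2
                  (pc.1 ++ [count], count)) ([0], 0)).1
              (i + min (tokens.length : Int) ws) 0
        then windows ++
          [(PySem.List.slice tokens (some i) (some (i + min (tokens.length : Int) ws)), 1)]
        else windows ++
          [(PySem.List.slice tokens (some i) (some (i + min (tokens.length : Int) ws)), 0)])
      acc := by
  set N : Nat := tokens.length with hN
  set w : Int := min (N : Int) ws with hw
  set pts : PySem.Set Int := E.foldl (fun pts e =>
      PySem.Set.add (PySem.Set.add pts (PySem.List.pyGetD e 0 0)) (PySem.List.pyGetD e 1 0))
      PySem.Set.empty with hpts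
  set χ : Int → Bool := fun k => PySem.Set.contains pts k with hχ
  have hpc : (PySem.List.pyRange 0 (N : Int)).foldl
      (fun (pc : List Int × Int) k =>
        let count := if PySem.Set.contains pts k then pc.2 + 1 else pc.2
        (pc.1 ++ [count], count)) ([0], 0)
      = ((List.range (N + 1)).map (pvC χ), pvC χ N) := pvPrefixFold χ N
  rw [hpc]
  have hmem : ∀ x : Int, x ∈ pts ↔
      ∃ e ∈ E, x = PySem.List.pyGetD e 0 0 ∨ x = PySem.List.pyGetD e 1 0 := by
    intro x
    rw [hpts, pvMem_ptsFold]
    simp [PySem.Set.empty]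
  refine List.foldl_ext _ _ acc (fun acc' i hi => ?_)
  rw [PySem.List.mem_pyRange_one] at hi
  have hl : E.foldl (fun (st : Option Int) e =>
        if (pvInRange (PySem.List.pyGetD e 0 0) i (i + w)
             || pvInRange (PySem.List.pyGetD e 1 0) i (i + w)) && st.isNone
        then some 1 else st) none
      = if E.any (fun e => pvInRange (PySem.List.pyGetD e 0 0) i (i + w)
             || pvInRange (PySem.List.pyGetD e 1 0) i (i + w)) then some 1 else none :=
    pvLabelFold_none _ E
  rw [hl]
  by_cases hw0 : 0 < w
  · -- positive window width: compare `any` with the prefix difference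
    have hga : PySem.List.pyGetD ((List.range (N + 1)).map (pvC χ)) i 0 = pvC χ i.toNat := by
      rw [PySem.List.pyGetD_of_nonneg _ _ hi.1, PySem.List.getD_map_range _ _ _ _ (by omega)]
    have hgb : PySem.List.pyGetD ((List.range (N + 1)).map (pvC χ)) (i + w) 0
        = pvC χ (i + w).toNat := by
      rw [PySem.List.pyGetD_of_nonneg _ _ (by omega),
        PySem.List.getD_map_range _ _ _ _ (by omega)]
    have hiff : (E.any (fun e => pvInRange (PySem.List.pyGetD e 0 0) i (i + w)
             || pvInRange (PySem.List.pyGetD e 1 0) i (i + w)) = true)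
        ↔ pvC χ i.toNat < pvC χ (i + w).toNat := by
      rw [pvC_lt_iff χ i.toNat (i + w).toNat (by omega), List.any_eq_true]
      constructor
      · rintro ⟨e, he, hce⟩
        simp only [pvInRange, Bool.or_eq_true, Bool.and_eq_true, decide_eq_true_eq] at hce
        rcases hce with ⟨h1, h2⟩ | ⟨h1, h2⟩
        · refine ⟨(PySem.List.pyGetD e 0 0).toNat, by omega, by omega, ?_⟩
          rw [hχ]
          simp only [PySem.Set.contains_iff, hmem]
          exact ⟨e, he, Or.inl (by omega)⟩
        · refine ⟨(PySem.List.pyGetD e 1 0).toNat, by omega, by omega, ?_⟩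
          rw [hχ]
          simp only [PySem.Set.contains_iff, hmem]
          exact ⟨e, he, Or.inr (by omega)⟩
      · rintro ⟨k, hk1, hk2, hk3⟩
        rw [hχ] at hk3
        simp only [PySem.Set.contains_iff, hmem] at hk3
        obtain ⟨e, he, h01⟩ := hk3
        refine ⟨e, he, ?_⟩
        simp only [pvInRange, Bool.or_eq_true, Bool.and_eq_true, decide_eq_true_eq]
        rcases h01 with h | h
        · left; omega
        · right; omega
    by_cases hc : pvC χ i.toNat < pvC χ (i + w).toNat
    · have hany := hiff.mpr hc
      rw [hany, if_pos rfl, if_pos ⟨hw0, by rw [hga, hgb]; exact hc⟩]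
      rfl
    · have hany : (E.any (fun e => pvInRange (PySem.List.pyGetD e 0 0) i (i + w)
             || pvInRange (PySem.List.pyGetD e 1 0) i (i + w))) = false := by
        rw [← Bool.not_eq_true]
        exact fun h => hc (hiff.mp h)
      rw [hany, if_neg (by simp), if_neg (by rw [hga, hgb]; exact fun hcon => hc hcon.2)]
      rfl
  · -- non-positive window width: the range is empty on A's side, the guard false on B's
    have hany : (E.any (fun e => pvInRange (PySem.List.pyGetD e 0 0) i (i + w)
           || pvInRange (PySem.List.pyGetD e 1 0) i (i + w))) = false := by
      rw [List.any_eq_false]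
      intro e _
      simp only [pvInRange, Bool.or_eq_true, Bool.and_eq_true, decide_eq_true_eq, not_or,
        not_and]
      omega
    rw [hany, if_neg (by simp), if_neg (fun hcon => hw0 hcon.1)]
    rfl

-- ===== VERDICT (by name: the statement is the Claim_ definition above) =====
theorem feed_windows_only_tokens_spec : Claim_equal_feed_windows_only_tokens := by
  unfold Claim_equal_feed_windows_only_tokens
  intro data ws _hdom _hpre
  unfold Spec_feed_windows_only_tokens
  unfold feed_windows_only_tokens feed_windows_only_tokens_alt
  exact List.foldl_ext _ _ []
    (fun acc p _ => pvSentenceEq (PySem.Str.split₀ p.1) p.2 ws acc)
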